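-- pv_equiv track=rewrite | github.com/kaskanio/chatbot_builder | transformation.py | process_hri_string
-- ===== SOURCE A (Python) =====
-- def process_hri_string(hri_string):
--     parts = hri_string.split()
--     formatted_parts = []
--     current_string = []
--     for part in parts:
--         if '.' in part:
--             if current_string:
--                 formatted_string = " ".join(current_string)
--                 formatted_string = formatted_string.replace("'", "\\'")
--                 formatted_parts.append("'{}'".format(formatted_string))
--                 current_string = []
--             formatted_parts.append(part)
--         else:
--             current_string.append(part)
--     if current_string:
--         formatted_string = " ".join(current_string)
--         formatted_string = formatted_string.replace("'", "\\'")
--         formatted_parts.append("'{}'".format(formatted_string))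
--     return ' '.join(formatted_parts)
-- ===== SOURCE B (Python) =====
-- def process_hri_string(hri_string):
--     # Stage 1: group the tokens into maximal runs of equal "contains a dot" key.
--     groups = []
--     for part in hri_string.split():
--         if groups and ('.' in part) == ('.' in groups[-1][0]):
--             groups[-1].append(part)
--         else:
--             groups.append([part])
--     # Stage 2: emit each run: dotted runs verbatim, other runs escaped and quoted.
--     pieces = []
--     for g in groups:
--         if '.' in g[0]:
--             pieces += g
--         else:
--             pieces.append("'" + ' '.join(g).replace("'", "\\'") + "'")
--     return ' '.join(pieces)
-- ===== Notes on version B (the rewrite author's own statement) =====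
-- stated objective: alternative
-- what changed: Replaces A's single pass with a pending current_string buffer and a duplicated post-loop flush by two staged passes: first a groupby-style pass partitions the tokens into maximal runs of equal dottedness, then a separate emit pass outputs dotted runs verbatim and quotes/escapes the others, so the quoting code appears once and there is no flush.
import Mathlib
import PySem

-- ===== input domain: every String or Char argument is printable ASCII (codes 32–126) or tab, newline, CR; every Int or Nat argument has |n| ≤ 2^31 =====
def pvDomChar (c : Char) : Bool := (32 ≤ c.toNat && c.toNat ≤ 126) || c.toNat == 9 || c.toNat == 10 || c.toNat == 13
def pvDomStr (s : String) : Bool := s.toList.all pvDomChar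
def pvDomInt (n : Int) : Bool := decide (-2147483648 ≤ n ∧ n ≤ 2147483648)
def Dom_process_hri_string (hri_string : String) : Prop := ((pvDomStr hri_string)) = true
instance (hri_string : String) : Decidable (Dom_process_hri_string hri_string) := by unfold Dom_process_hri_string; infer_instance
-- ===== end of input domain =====

-- B replaces A's single pass with a pending buffer and duplicated flush by two staged passes:
-- a groupby-style pass into maximal runs of equal dottedness, then an emit pass; same output.

-- "'{}'".format(" ".join(cs).replace("'", "\\'")) — shared by both sources verbatim
def pvQuote (cs : List String) : String :=
  "'" ++ PySem.Str.replace (PySem.Str.join " " cs) "'" "\\'" ++ "'"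

-- '.' in part — shared by both sources
def pvKey (p : String) : Bool := PySem.Str.isIn "." p

-- ===== PORT A =====
-- step of A's for-loop over state (formatted_parts, current_string)
def pvAStep (st : List String × List String) (part : String) : List String × List String :=
  if pvKey part then
    ((if st.2 = [] then st.1 else st.1 ++ [pvQuote st.2]) ++ [part], [])
  else (st.1, st.2 ++ [part])

def process_hri_string (hri_string : String) : String :=
  let parts := PySem.Str.split₀ hri_string
  let st := parts.foldl pvAStep ([], [])
  PySem.Str.join " " (if st.2 = [] then st.1 else st.1 ++ [pvQuote st.2])

-- ===== PORT B =====
-- '.' in g[0] — the key of a group, read from its first token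
def pvHeadKey (g : List String) : Bool := pvKey (g.headD "")

-- stage 1 step: append part to the last group if its key matches that group's first token,
-- else open a new group (Source B's first loop; groups[-1] read/mutated via getLast?/dropLast)
def pvBStep (gs : List (List String)) (p : String) : List (List String) :=
  match gs.getLast? with
  | some g => if pvKey p = pvHeadKey g then gs.dropLast ++ [g ++ [p]] else gs ++ [[p]]
  | none => gs ++ [[p]]

-- stage 2 step: dotted runs verbatim, other runs quoted (Source B's second loop)
def pvEmitStep (acc : List String) (g : List String) : List String :=
  if pvHeadKey g then acc ++ g else acc ++ [pvQuote g]

def process_hri_string_alt (hri_string : String) : String :=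
  let parts := PySem.Str.split₀ hri_string
  let groups := parts.foldl pvBStep []
  let pieces := groups.foldl pvEmitStep []
  PySem.Str.join " " pieces

-- ===== PRECONDITION & SPEC =====
def Spec_process_hri_string (hri_string : String) (out : String) : Prop := out = process_hri_string_alt hri_string
instance (hri_string : String) (out : String) : Decidable (Spec_process_hri_string hri_string out) := by unfold Spec_process_hri_string; infer_instance

-- ===== CLAIM (what is proved, stated in full; the proofs are below) =====
def Claim_equal_process_hri_string : Prop := ∀ (hri_string : String), Dom_process_hri_string hri_string → Spec_process_hri_string hri_string (process_hri_string hri_string)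

-- ===== LEMMAS AND PROOFS =====

-- "has the same key as k"
def pvSk (k : Bool) (q : String) : Bool := pvKey q == k

-- the maximal runs of equal key (proof-side normal form both ports are reduced to)
def pvRuns : List String → List (List String)
  | [] => []
  | p :: rest =>
    (p :: rest.takeWhile (pvSk (pvKey p))) :: pvRuns (rest.dropWhile (pvSk (pvKey p)))
termination_by l => l.length
decreasing_by exact Nat.lt_succ_of_le (List.length_dropWhile_le _ _)

theorem pvRuns_cons (p : String) (rest : List String) :
    pvRuns (p :: rest) =
      (p :: rest.takeWhile (pvSk (pvKey p))) :: pvRuns (rest.dropWhile (pvSk (pvKey p))) := by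
  rw [pvRuns]

-- emit pass on a run list, recursively
def pvEmitList : List (List String) → List String
  | [] => []
  | g :: gs => (if pvHeadKey g then g else [pvQuote g]) ++ pvEmitList gs

-- A's remaining output, given the tokens still to process and the pending current_string
def pvARun : List String → List String → List String
  | [], cs => if cs = [] then [] else [pvQuote cs]
  | p :: rest, cs =>
    if pvKey p then
      (if cs = [] then [] else [pvQuote cs]) ++ p :: pvARun rest []
    else pvARun rest (cs ++ [p])

theorem pvFoldA (parts : List String) : ∀ (fp cs : List String),
    (if (parts.foldl pvAStep (fp, cs)).2 = [] then (parts.foldl pvAStep (fp, cs)).1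
     else (parts.foldl pvAStep (fp, cs)).1 ++ [pvQuote (parts.foldl pvAStep (fp, cs)).2])
      = fp ++ pvARun parts cs := by
  induction parts with
  | nil => intro fp cs; by_cases h : cs = [] <;> simp [pvARun, h]
  | cons p rest ih =>
    intro fp cs
    by_cases hd : pvKey p
    · by_cases h : cs = [] <;>
        simp [pvAStep, pvARun, hd, h, ih, List.append_assoc]
    · simp [pvAStep, pvARun, hd, ih]

theorem pvFoldEmit (gs : List (List String)) : ∀ acc,
    gs.foldl pvEmitStep acc = acc ++ pvEmitList gs := by
  induction gs with
  | nil => intro acc; simp [pvEmitList]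
  | cons g gs ih =>
    intro acc
    by_cases h : pvHeadKey g
    · rw [List.foldl_cons, show pvEmitStep acc g = acc ++ g from by simp [pvEmitStep, h], ih,
          show pvEmitList (g :: gs) = g ++ pvEmitList gs from by simp [pvEmitList, h],
          List.append_assoc]
    · rw [List.foldl_cons, show pvEmitStep acc g = acc ++ [pvQuote g] from by simp [pvEmitStep, h], ih,
          show pvEmitList (g :: gs) = [pvQuote g] ++ pvEmitList gs from by simp [pvEmitList, h],
          List.append_assoc]

theorem pvFoldB (parts : List String) : ∀ (gs : List (List String)) (g : List String),
    g ≠ [] →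
    parts.foldl pvBStep (gs ++ [g]) =
      gs ++ (g ++ parts.takeWhile (pvSk (pvHeadKey g)))
        :: pvRuns (parts.dropWhile (pvSk (pvHeadKey g))) := by
  induction parts with
  | nil => intro gs g hg; simp [pvRuns]
  | cons p rest ih =>
    intro gs g hg
    by_cases hk : pvKey p = pvHeadKey g
    · have hstep : pvBStep (gs ++ [g]) p = gs ++ [g ++ [p]] := by
        simp [pvBStep, hk]
      have hhead : pvHeadKey (g ++ [p]) = pvHeadKey g := by
        cases g with
        | nil => exact absurd rfl hg
        | cons a t => simp [pvHeadKey]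
      have hsk : pvSk (pvHeadKey g) p = true := by simp [pvSk, hk]
      rw [List.foldl_cons, hstep, ih gs (g ++ [p]) (by simp), hhead]
      simp [List.takeWhile, List.dropWhile, hsk, List.append_assoc]
    · have hstep : pvBStep (gs ++ [g]) p = (gs ++ [g]) ++ [[p]] := by
        simp [pvBStep, hk]
      have hhead : pvHeadKey [p] = pvKey p := by simp [pvHeadKey]
      have hsk : pvSk (pvHeadKey g) p = false := by simp [pvSk]; exact hk
      rw [List.foldl_cons, hstep, ih (gs ++ [g]) [p] (by simp), hhead]
      simp [List.takeWhile, List.dropWhile, hsk, pvRuns_cons, List.append_assoc]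

theorem pvFoldB_nil (parts : List String) :
    parts.foldl pvBStep [] = pvRuns parts := by
  cases parts with
  | nil => simp [pvRuns]
  | cons p rest =>
    have hstep : pvBStep [] p = [] ++ [[p]] := by simp [pvBStep]
    have hhead : pvHeadKey [p] = pvKey p := by simp [pvHeadKey]
    rw [List.foldl_cons, hstep, pvFoldB rest [] [p] (by simp), hhead, pvRuns_cons]
    simp

-- peeling one dotted token off the run decomposition
theorem pvEmit_dotted (p : String) (rest : List String) (hd : pvKey p = true) :
    pvEmitList (pvRuns (p :: rest)) = p :: pvEmitList (pvRuns rest) := by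
  rw [pvRuns_cons]
  have hhk : ∀ t, pvHeadKey (p :: t) = true := by intro t; simpa [pvHeadKey] using hd
  cases rest with
  | nil => simp [pvEmitList, pvRuns, hhk]
  | cons q r =>
    by_cases hq : pvKey q = pvKey p
    · have hsk : pvSk (pvKey p) q = true := by simp [pvSk, hq]
      have hfun : pvSk (pvKey q) = pvSk (pvKey p) := by rw [hq]
      rw [pvRuns_cons, hfun]
      have hhkq : ∀ t, pvHeadKey (q :: t) = true := by
        intro t; simp [pvHeadKey, hq, hd]
      simp [List.takeWhile, List.dropWhile, hsk, pvEmitList, hhk, hhkq]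
    · have hsk : pvSk (pvKey p) q = false := by simp [pvSk]; exact hq
      rw [show (q :: r).takeWhile (pvSk (pvKey p)) = [] from by simp [List.takeWhile, hsk],
          show (q :: r).dropWhile (pvSk (pvKey p)) = q :: r from by simp [List.dropWhile, hsk]]
      simp [pvEmitList, hhk]

theorem pvRunEmit (parts : List String) :
    pvARun parts [] = pvEmitList (pvRuns parts) ∧
    ∀ cs, cs ≠ [] →
      pvARun parts cs =
        pvQuote (cs ++ parts.takeWhile (pvSk false)) :: pvEmitList (pvRuns (parts.dropWhile (pvSk false))) := by
  induction parts with
  | nil => exact ⟨by simp [pvARun, pvRuns, pvEmitList], by intro cs h; simp [pvARun, pvRuns, pvEmitList, h]⟩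
  | cons p rest ih =>
    by_cases hd : pvKey p
    · constructor
      · rw [show pvARun (p :: rest) [] = p :: pvARun rest [] from by simp [pvARun, hd],
            ih.1, pvEmit_dotted p rest hd]
      · intro cs h
        have hsk : pvSk false p = false := by simp [pvSk, hd]
        rw [show pvARun (p :: rest) cs = pvQuote cs :: p :: pvARun rest [] from by simp [pvARun, hd, h],
            ih.1, ← pvEmit_dotted p rest hd]
        simp [List.takeWhile, List.dropWhile, hsk]
    · have hsk : pvSk false p = true := by simp [pvSk, hd]
      have hfun : pvSk (pvKey p) = pvSk false := by
        rw [show pvKey p = false from Bool.eq_false_iff.mpr hd]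
      have hhk : ∀ t, pvHeadKey (p :: t) = false := by
        intro t; simp [pvHeadKey, Bool.eq_false_iff.mpr hd]
      constructor
      · rw [show pvARun (p :: rest) [] = pvARun rest [p] from by simp [pvARun, hd],
            (ih.2 [p] (by simp)), pvRuns_cons, hfun]
        simp [pvEmitList, hhk]
      · intro cs h
        rw [show pvARun (p :: rest) cs = pvARun rest (cs ++ [p]) from by simp [pvARun, hd],
            ih.2 (cs ++ [p]) (by simp)]
        simp [List.takeWhile, List.dropWhile, hsk, List.append_assoc]

-- ===== VERDICT (by name: the statement is the Claim_ definition above) =====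
theorem process_hri_string_spec : Claim_equal_process_hri_string := by
  intro s _
  unfold Spec_process_hri_string process_hri_string process_hri_string_alt
  simp only []
  rw [pvFoldA, pvFoldB_nil, pvFoldEmit, (pvRunEmit _).1]
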